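-- pv_equiv track=rewrite | github.com/RDavid32/test_baekjoon | 백준/Platinum/1071. 소트/소트.py | solution
-- ===== SOURCE A (Python) =====
-- def solution(N, arr):
--     arr.sort(reverse=True)
--     mx = arr[0]
--     answer = [arr.pop()]
--     while len(arr) > 0:
--         wait = []
--
--         if answer[-1] + 1 == arr[-1]:
--             if arr[-1] == mx:
--                 idx = len(answer) - 1
--                 while idx >= 0 and answer[idx] == answer[-1]:
--                     idx -= 1
--                 answer = answer[:idx+1] + arr + answer[idx+1:]
--                 break
--
--             else:
--                 while answer[-1] + 1 == arr[-1]: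
--                     wait.append(arr.pop())
--
--         answer.append(arr.pop())
--         arr += wait
--
--     return ' '.join([str(i) for i in answer])
-- ===== SOURCE B (Python) =====
-- def solution(N, arr):
--     # Run-based greedy over the ascending sorted list: emit whole runs of equal
--     # values, borrow one copy of the next value when a run conflicts (value ==
--     # last+1), and when the conflicting run is the final one place it before the
--     # last emitted run. (Return value only; unlike A, arr is not mutated.)
--     s = sorted(arr)
--     n = len(s)
--     blocks = []          # finished (value, count) blocks
--     prev = None          # last emitted block, kept aside for the final swap
--     i = 0
--     while i < n:
--         v = s[i]
--         j = i
--         while j < n and s[j] == v: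
--             j += 1
--         c = j - i
--         if prev is None or v != prev[0] + 1:
--             if prev is not None:
--                 blocks.append(prev)
--             prev = (v, c)
--             i = j
--         elif j == n:
--             # every remaining element equals prev[0]+1: put the run before prev
--             blocks.append((v, c))
--             i = j
--         else:
--             # borrow one copy of the next larger value, then emit the run
--             blocks.append(prev)
--             blocks.append((s[j], 1))
--             prev = (v, c)
--             i = j + 1
--     if prev is not None:
--         blocks.append(prev)
--     out = []
--     for v, c in blocks:
--         out.extend([v] * c)
--     return ' '.join([str(i) for i in out])
-- ===== Notes on version B (the rewrite author's own statement) =====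
-- stated objective: alternative
-- what changed: A pops a reverse-sorted copy element by element, shuffling conflicting values through a 'wait' list and splicing into the middle of the answer; B walks the ascending sorted list once, run-by-run with (value,count) blocks, borrowing one copy of the next value on a conflict and swapping the last two blocks in the all-remaining-equal case.
-- outside the precondition, e.g. on solution(0, []): A raises IndexError, B returns ''
import Mathlib
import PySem

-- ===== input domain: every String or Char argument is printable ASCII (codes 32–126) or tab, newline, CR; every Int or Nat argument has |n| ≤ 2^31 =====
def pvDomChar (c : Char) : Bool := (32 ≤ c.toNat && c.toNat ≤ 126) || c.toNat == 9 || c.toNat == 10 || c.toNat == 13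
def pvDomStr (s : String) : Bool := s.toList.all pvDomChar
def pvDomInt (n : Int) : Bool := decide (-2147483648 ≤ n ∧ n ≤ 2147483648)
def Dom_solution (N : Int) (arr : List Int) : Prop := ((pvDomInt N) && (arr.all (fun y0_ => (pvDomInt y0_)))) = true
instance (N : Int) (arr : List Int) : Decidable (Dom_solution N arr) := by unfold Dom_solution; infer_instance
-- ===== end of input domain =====

-- B re-implements A run-by-run over the ascending sorted list (A pops an explicitly
-- reverse-sorted list element-wise with a wait-list and a mid-list splice); equality is
-- about the RETURN value only — Python A sorts/empties its argument in place, B does not.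

-- ===== PORT A =====
-- while idx >= 0 and answer[idx] == answer[-1]: idx -= 1   (a = answer[-1]; fuel k = idx+1)
def pvTrailIdx (answer : List Int) (a : Int) : Nat → Int
  | 0 => -1
  | k+1 => if PySem.List.pyGetD answer (k : Int) 0 = a then pvTrailIdx answer a k else (k : Int)

-- while answer[-1] + 1 == arr[-1]: wait.append(arr.pop())   (a = answer[-1], unchanged here)
def pvPopWait (a : Int) (wait arr : List Int) : List Int × List Int :=
  match h : arr.getLast? with
  | none => (wait, arr)   -- Python would raise IndexError reading arr[-1]; unreachable on admitted inputs
  | some x =>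
      if a + 1 = x then pvPopWait a (wait ++ [x]) arr.dropLast else (wait, arr)
termination_by arr.length
decreasing_by
  have hne : arr ≠ [] := by rintro rfl; simp at h
  have hl : 0 < arr.length := List.length_pos_iff.mpr hne
  simp [List.length_dropLast]; omega

-- the main 'while len(arr) > 0' loop; one unit of fuel per iteration (each iteration
-- removes exactly one element net, so the initial fuel len(arr)+1 is always enough)
def pvLoopA (mx : Int) : Nat → List Int → List Int → List Int
  | 0, answer, _ => answer
  | fuel+1, answer, arr =>
    match arr.getLast? with
    | none => answer   -- len(arr) == 0
    | some m =>
      if PySem.List.pyGetD answer (-1) 0 + 1 = m then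
        if m = mx then
          let idx := pvTrailIdx answer (PySem.List.pyGetD answer (-1) 0) answer.length
          PySem.List.slice answer none (some (idx+1)) ++ arr ++ PySem.List.slice answer (some (idx+1)) none
        else
          let p := pvPopWait (PySem.List.pyGetD answer (-1) 0) [] arr
          match p.2.getLast? with
          | some w => pvLoopA mx fuel (answer ++ [w]) (p.2.dropLast ++ p.1)
          | none => answer   -- Python raises IndexError (arr.pop() on empty); unreachable on admitted inputs
      else
        pvLoopA mx fuel (answer ++ [m]) arr.dropLast   -- wait == [] here, so 'arr += wait' is a no-op

def solution (N : Int) (arr : List Int) : String :=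
  let arr1 := PySem.List.sorted arr (fun x => x) true    -- arr.sort(reverse=True)
  match PySem.List.pyGet? arr1 0, PySem.List.pop? arr1 with
  | some mx, some pr =>
      PySem.Str.join " " ((pvLoopA mx (pr.2.length + 1) [pr.1] pr.2).map (fun i => PySem.Int.toStr i))
  | _, _ => ""   -- arr == []: Python raises IndexError (excluded by Pre_solution)

-- ===== PORT B =====
-- while j < n and s[j] == v: j += 1
def pvScanRun (s : List Int) (v : Int) (j : Nat) : Nat :=
  if h : j < s.length then
    if PySem.List.pyGetD s (j : Int) 0 = v then pvScanRun s v (j+1) else j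
  else j
termination_by s.length - j

-- the main 'while i < n' loop of B; i grows by at least 1 each iteration
def pvLoopB (s : List Int) : Nat → Nat → List (Int × Int) → Option (Int × Int) → List (Int × Int) × Option (Int × Int)
  | 0, _, blocks, prev => (blocks, prev)
  | fuel+1, i, blocks, prev =>
    if i < s.length then
      let v := PySem.List.pyGetD s (i : Int) 0
      let j := pvScanRun s v i
      let c : Int := (j : Int) - (i : Int)
      match prev with
      | none => pvLoopB s fuel j blocks (some (v, c))
      | some p =>
        if v ≠ p.1 + 1 then pvLoopB s fuel j (blocks ++ [p]) (some (v, c))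
        else if j = s.length then pvLoopB s fuel j (blocks ++ [(v, c)]) (some p)
        else pvLoopB s fuel (j+1) (blocks ++ [p, (PySem.List.pyGetD s (j : Int) 0, 1)]) (some (v, c))
    else (blocks, prev)

def solution_alt (N : Int) (arr : List Int) : String :=
  let s := PySem.List.sorted arr (fun x => x)
  let r := pvLoopB s (s.length + 1) 0 [] none
  let blocks := r.1 ++ (match r.2 with | some p => [p] | none => [])
  let out := blocks.foldl (fun acc p => acc ++ PySem.List.pyRepeat [p.1] p.2) []
  PySem.Str.join " " (out.map (fun i => PySem.Int.toStr i))

-- ===== PRECONDITION & SPEC =====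
-- Python A raises IndexError (arr[0] on the empty list) exactly when arr == []
def Pre_solution (N : Int) (arr : List Int) : Prop := arr ≠ []
instance (N : Int) (arr : List Int) : Decidable (Pre_solution N arr) := by unfold Pre_solution; infer_instance
def pvWitness_solution : Int × List Int := (3, [2, 1, 2])

def Spec_solution (N : Int) (arr : List Int) (out : String) : Prop := out = solution_alt N arr
instance (N : Int) (arr : List Int) (out : String) : Decidable (Spec_solution N arr out) := by unfold Spec_solution; infer_instance

-- ===== CLAIM (what is proved, stated in full; the proofs are below) =====
def Claim_equal_solution : Prop := ∀ (N : Int) (arr : List Int), Dom_solution N arr → Pre_solution N arr → Spec_solution N arr (solution N arr)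

-- ===== LEMMAS AND PROOFS =====

-- run-length view shared by both proofs: a block list expands to the emitted numbers
def pvExpand (rs : List (Int × Nat)) : List Int := rs.flatMap (fun r => List.replicate r.2 r.1)

-- the common abstract greedy: previous block p, remaining runs → emitted blocks
def pvGb : Int × Nat → List (Int × Nat) → List (Int × Nat)
  | p, [] => [p]
  | p, q :: rest =>
    if q.1 = p.1 + 1 then
      match rest with
      | [] => [q, p]
      | w :: rest' => p :: (w.1, 1) :: pvGb q (if w.2 = 1 then rest' else (w.1, w.2 - 1) :: rest')
    else p :: pvGb q rest
termination_by _ rs => rs.length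
decreasing_by
  all_goals (try split) <;> (simp; try omega)

def pvGo : List (Int × Nat) → List (Int × Nat)
  | [] => []
  | p :: rest => pvGb p rest

-- run-length encoding of a (sorted) list
def pvRuns : List Int → List (Int × Nat)
  | [] => []
  | x :: xs => (x, 1 + (xs.takeWhile (· == x)).length) :: pvRuns (xs.dropWhile (· == x))
termination_by l => l.length
decreasing_by
  have := List.length_dropWhile_le (· == x) xs
  simp; omega

theorem pvGb_nil (p : Int × Nat) : pvGb p [] = [p] := by
  rw [pvGb.eq_def]

theorem pvGb_single (p q : Int × Nat) (hq : q.1 = p.1 + 1) : pvGb p [q] = [q, p] := by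
  rw [pvGb.eq_def]; simp [hq]

theorem pvGb_borrow (p q w : Int × Nat) (rest' : List (Int × Nat)) (hq : q.1 = p.1 + 1) :
    pvGb p (q :: w :: rest')
      = p :: (w.1, 1) :: pvGb q (if h : w.2 = 1 then rest' else (w.1, w.2 - 1) :: rest') := by
  by_cases h1 : w.2 = 1 <;> rw [pvGb.eq_def] <;> simp [hq, h1]

theorem pvGb_no (p q : Int × Nat) (rest : List (Int × Nat)) (hq : ¬ q.1 = p.1 + 1) :
    pvGb p (q :: rest) = p :: pvGb q rest := by
  rw [pvGb.eq_def]; simp [hq]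

theorem pvRuns_nil : pvRuns [] = [] := by
  rw [pvRuns.eq_def]

theorem pvRuns_cons (x : Int) (xs : List Int) :
    pvRuns (x :: xs) = (x, 1 + (xs.takeWhile (· == x)).length) :: pvRuns (xs.dropWhile (· == x)) := by
  rw [pvRuns.eq_def]

theorem pvExpand_cons (r : Int × Nat) (rs : List (Int × Nat)) :
    pvExpand (r :: rs) = List.replicate r.2 r.1 ++ pvExpand rs := by
  simp [pvExpand]

theorem pvExpand_len_cons (r : Int × Nat) (rs : List (Int × Nat)) :
    (pvExpand (r :: rs)).length = r.2 + (pvExpand rs).length := by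
  simp [pvExpand_cons]

theorem pvExpandHead (r : Int × Nat) (t : List (Int × Nat)) (h : 0 < r.2) :
    (pvExpand (r :: t)).head? = some r.1 := by
  obtain ⟨k, hk⟩ : ∃ k, r.2 = k + 1 := ⟨r.2 - 1, by omega⟩
  rw [pvExpand_cons, hk, List.replicate_succ]
  simp

-- A's reverse sort is the reverse of the ascending sort (Int keys: equal keys are equal values)
theorem pvSortRev (arr : List Int) :
    PySem.List.sorted arr (fun x => x) true = (PySem.List.sorted arr (fun x => x)).reverse := by
  apply List.eq_of_perm_of_sorted (le := fun a b : Int => b ≤ a)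
  · intro a b _ _ h1 h2; exact le_antisymm h2 h1
  · exact PySem.List.sorted_pairwise_rev arr (fun x => x)
  · exact List.pairwise_reverse.mpr (PySem.List.sorted_pairwise arr (fun x => x))
  · exact ((PySem.List.sorted_perm arr (fun x => x) true).trans
      (PySem.List.sorted_perm arr (fun x => x) false).symm).trans (List.reverse_perm _).symm

theorem pvRevDropLast (l : List Int) : l.reverse.dropLast = l.tail.reverse := by
  cases l with
  | nil => rfl
  | cons a t => simp

theorem pvGetDsome (s : List Int) (i : Nat) (x : Int) (h : s[i]? = some x) :
    PySem.List.pyGetD s (i : Int) 0 = x := by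
  obtain ⟨hi, hx⟩ := List.getElem?_eq_some_iff.mp h
  rw [PySem.List.pyGetD_natCast, List.getD_eq_getElem s 0 hi]
  exact hx

theorem pvGetHead (s : List Int) (i : Nat) (x : Int) (r : List Int) (h : s.drop i = x :: r) :
    PySem.List.pyGetD s (i : Int) 0 = x :=
  pvGetDsome s i x (by rw [← List.head?_drop, h]; rfl)

theorem pvBlockLast (pre : List Int) (a : Int) (t : Nat) (ht : 0 < t) :
    (pre ++ List.replicate t a).getLast? = some a := by
  obtain ⟨k, rfl⟩ : ∃ k, t = k + 1 := ⟨t - 1, by omega⟩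
  rw [List.replicate_succ', ← List.append_assoc, List.getLast?_concat]

theorem pvBlockGetD (pre : List Int) (a : Int) (t : Nat) (ht : 0 < t) :
    PySem.List.pyGetD (pre ++ List.replicate t a) (-1) 0 = a := by
  have hne : pre ++ List.replicate t a ≠ [] := by
    intro e; have := congrArg List.length e; simp at this; omega
  rw [PySem.List.pyGetD_neg_one _ _ hne]
  have hb := pvBlockLast pre a t ht
  rw [List.getLast?_eq_some_getLast hne] at hb
  exact Option.some.inj hb

-- ---------- step lemmas for A's loop ----------
theorem pvLoopA_nil (mx : Int) (f : Nat) (answer : List Int) :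
    pvLoopA mx (f+1) answer [] = answer := by
  simp [pvLoopA]

theorem pvLoopA_no (mx m : Int) (f : Nat) (answer arr : List Int)
    (h1 : arr.getLast? = some m) (h2 : PySem.List.pyGetD answer (-1) 0 + 1 ≠ m) :
    pvLoopA mx (f+1) answer arr = pvLoopA mx f (answer ++ [m]) arr.dropLast := by
  simp [pvLoopA, h1, h2]

theorem pvLoopA_mx (mx m : Int) (f : Nat) (answer arr : List Int)
    (h1 : arr.getLast? = some m) (h2 : PySem.List.pyGetD answer (-1) 0 + 1 = m) (h3 : m = mx) :
    pvLoopA mx (f+1) answer arr =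
      PySem.List.slice answer none (some (pvTrailIdx answer (PySem.List.pyGetD answer (-1) 0) answer.length + 1)) ++ arr ++
      PySem.List.slice answer (some (pvTrailIdx answer (PySem.List.pyGetD answer (-1) 0) answer.length + 1)) none := by
  simp [pvLoopA, h1, h2, h3]

theorem pvLoopA_borrow (mx m w : Int) (f : Nat) (answer arr : List Int)
    (h1 : arr.getLast? = some m) (h2 : PySem.List.pyGetD answer (-1) 0 + 1 = m) (h3 : ¬ m = mx)
    (h4 : (pvPopWait (PySem.List.pyGetD answer (-1) 0) [] arr).2.getLast? = some w) :
    pvLoopA mx (f+1) answer arr = pvLoopA mx f (answer ++ [w])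
      ((pvPopWait (PySem.List.pyGetD answer (-1) 0) [] arr).2.dropLast
        ++ (pvPopWait (PySem.List.pyGetD answer (-1) 0) [] arr).1) := by
  simp [pvLoopA, h1, h2, h3, h4]

-- ---------- the inner pop-while ----------
theorem pvPopWait_stop (a : Int) (wait arr : List Int)
    (h : ∀ x, arr.getLast? = some x → a + 1 ≠ x) : pvPopWait a wait arr = (wait, arr) := by
  rw [pvPopWait]
  split
  · rfl
  · next x h' => rw [if_neg (h x h')]

theorem pvPopWait_step (a x : Int) (wait arr : List Int)
    (h1 : arr.getLast? = some x) (h2 : a + 1 = x) :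
    pvPopWait a wait arr = pvPopWait a (wait ++ [x]) arr.dropLast := by
  conv_lhs => rw [pvPopWait]
  split
  · next h' => rw [h1] at h'; cases h'
  · next x' h' =>
      rw [h1] at h'
      obtain rfl : x = x' := by injection h'
      rw [if_pos h2]

theorem pvPopW (a m : Int) (hm : a + 1 = m) :
    ∀ (c : Nat) (wait rest : List Int),
      (∀ y, rest.head? = some y → a + 1 ≠ y) →
      pvPopWait a wait ((List.replicate c m ++ rest).reverse)
        = (wait ++ List.replicate c m, rest.reverse) := by
  intro c
  induction c with
  | zero =>
    intro wait rest h
    have := pvPopWait_stop a wait rest.reverse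
      (fun x hx => h x (by rwa [List.getLast?_reverse] at hx))
    simpa using this
  | succ c ih =>
    intro wait rest h
    have hL : ((List.replicate (c+1) m ++ rest).reverse).getLast? = some m := by
      rw [List.getLast?_reverse]; simp [List.replicate_succ]
    rw [pvPopWait_step a m wait _ hL hm]
    have hdl : ((List.replicate (c+1) m ++ rest).reverse).dropLast
        = (List.replicate c m ++ rest).reverse := by
      rw [pvRevDropLast]; simp [List.replicate_succ]
    rw [hdl, ih (wait ++ [m]) rest h]
    simp [List.replicate_succ]

-- ---------- the idx scan ----------
theorem pvTrail (a : Int) :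
    ∀ (t : Nat) (pre extra : List Int),
      (pre = [] ∨ pre.getLast? ≠ some a) →
      pvTrailIdx (pre ++ List.replicate t a ++ extra) a (pre.length + t) = (pre.length : Int) - 1 := by
  intro t
  induction t with
  | zero =>
    intro pre extra hpre
    cases pre with
    | nil => simp [pvTrailIdx]
    | cons b bs =>
      have hpre' : (b :: bs).getLast? ≠ some a := by
        rcases hpre with h | h
        · cases h
        · exact h
      obtain ⟨y, hy⟩ : ∃ y, (b :: bs).getLast? = some y :=
        ⟨(b :: bs).getLast (by simp), List.getLast?_eq_some_getLast (by simp)⟩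
      have hyne : ¬ y = a := fun e => hpre' (by rw [hy, e])
      have hval : ((b :: bs) ++ List.replicate 0 a ++ extra)[bs.length]? = some y := by
        rw [List.append_assoc, List.getElem?_append_left (by simp)]
        rw [show bs.length = (b :: bs).length - 1 from by simp, ← List.getLast?_eq_getElem?]
        exact hy
      have hg := pvGetDsome _ bs.length y hval
      have hlen : (b :: bs).length + 0 = bs.length + 1 := by simp
      rw [hlen]
      show (if PySem.List.pyGetD ((b :: bs) ++ List.replicate 0 a ++ extra) (bs.length : Int) 0 = a
            then pvTrailIdx ((b :: bs) ++ List.replicate 0 a ++ extra) a bs.length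
            else ((bs.length : Nat) : Int)) = ((b :: bs).length : Int) - 1
      rw [hg, if_neg hyne]
      simp
  | succ t ih =>
    intro pre extra hpre
    have hstep : pre.length + (t+1) = (pre.length + t) + 1 := rfl
    rw [hstep]
    show (if PySem.List.pyGetD (pre ++ List.replicate (t+1) a ++ extra) ((pre.length + t : Nat) : Int) 0 = a
          then pvTrailIdx (pre ++ List.replicate (t+1) a ++ extra) a (pre.length + t)
          else (((pre.length + t : Nat)) : Int)) = (pre.length : Int) - 1
    have hval : ((pre ++ List.replicate (t+1) a) ++ extra)[pre.length + t]? = some a := by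
      have h1 : pre.length + t < (pre ++ List.replicate (t+1) a).length := by simp
      rw [List.getElem?_append_left h1, List.getElem?_append_right (Nat.le_add_right pre.length t),
        List.getElem?_replicate]
      simp
    have hg := pvGetDsome _ (pre.length + t) a hval
    rw [hg, if_pos rfl]
    have hl : pre ++ List.replicate (t+1) a ++ extra = pre ++ List.replicate t a ++ ([a] ++ extra) := by
      rw [List.replicate_succ']; simp
    rw [hl]
    exact ih pre ([a] ++ extra) hpre

-- ---------- consuming a conflict-free run: c plain iterations of A's loop ----------
theorem pvConsumeRun (mx m : Int) :
    ∀ (c : Nat) (fuel : Nat) (answer rest : List Int) (la : Int),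
      answer.getLast? = some la → la + 1 ≠ m → c ≤ fuel →
      pvLoopA mx fuel answer ((List.replicate c m ++ rest).reverse)
        = pvLoopA mx (fuel - c) (answer ++ List.replicate c m) rest.reverse := by
  intro c
  induction c with
  | zero => intro fuel answer rest la _ _ _; simp
  | succ c ih =>
    intro fuel answer rest la h1 h2 h3
    obtain ⟨f, rfl⟩ : ∃ f, fuel = f + 1 := ⟨fuel - 1, by omega⟩
    have hans : answer ≠ [] := by rintro rfl; simp at h1
    have hL : ((List.replicate (c+1) m ++ rest).reverse).getLast? = some m := by
      rw [List.getLast?_reverse]; simp [List.replicate_succ]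
    have hcond : PySem.List.pyGetD answer (-1) 0 + 1 ≠ m := by
      rw [PySem.List.pyGetD_neg_one _ _ hans]
      have h' := List.getLast?_eq_some_getLast (l := answer) hans
      rw [h'] at h1
      injection h1 with e
      rw [e]; exact h2
    rw [pvLoopA_no mx m f answer _ hL hcond]
    have hdl : ((List.replicate (c+1) m ++ rest).reverse).dropLast
        = (List.replicate c m ++ rest).reverse := by
      rw [pvRevDropLast]; simp [List.replicate_succ]
    rw [hdl, ih f (answer ++ [m]) rest m List.getLast?_concat (by omega) (by omega)]
    have e1 : answer ++ [m] ++ List.replicate c m = answer ++ List.replicate (c+1) m := by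
      rw [List.append_assoc, List.replicate_succ]; rfl
    have e2 : f + 1 - (c + 1) = f - c := by omega
    rw [e1, e2]

-- ---------- shared facts about the modified run list of the borrow case ----------
theorem pvNewExpand (w : Int × Nat) (rest' : List (Int × Nat)) :
    pvExpand (if h : w.2 = 1 then rest' else (w.1, w.2 - 1) :: rest')
      = List.replicate (w.2 - 1) w.1 ++ pvExpand rest' := by
  by_cases h1 : w.2 = 1
  · simp [h1]
  · simp [h1, pvExpand_cons]

theorem pvNewCounts (q w : Int × Nat) (rest' : List (Int × Nat))
    (hc : ∀ r ∈ q :: w :: rest', 0 < r.2) (hw : ¬ w.2 = 1 → 0 < w.2 - 1) :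
    ∀ r ∈ (if h : w.2 = 1 then rest' else (w.1, w.2 - 1) :: rest'), 0 < r.2 := by
  intro r hr
  by_cases h1 : w.2 = 1
  · rw [dif_pos h1] at hr; exact hc r (by simp [hr])
  · rw [dif_neg h1] at hr
    rcases List.mem_cons.mp hr with rfl | hr'
    · simpa using hw h1
    · exact hc r (by simp [hr'])

theorem pvNewPairwise (q w : Int × Nat) (rest' : List (Int × Nat))
    (h3 : List.Pairwise (fun x y : Int × Nat => x.1 < y.1) (q :: w :: rest')) :
    List.Pairwise (fun x y : Int × Nat => x.1 < y.1)
      (q :: (if h : w.2 = 1 then rest' else (w.1, w.2 - 1) :: rest')) := by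
  have hfst : List.Pairwise (· < ·) ((q :: w :: rest').map Prod.fst) := List.pairwise_map.mpr h3
  by_cases h1 : w.2 = 1
  · rw [dif_pos h1]
    exact List.Pairwise.sublist ((List.sublist_cons_self w rest').cons₂ q) h3
  · rw [dif_neg h1]
    have hmap : ((q :: (w.1, w.2 - 1) :: rest').map Prod.fst) = ((q :: w :: rest').map Prod.fst) := by simp
    exact List.pairwise_map.mp (hmap ▸ hfst)

theorem pvNewLast (mx : Int) (q w : Int × Nat) (rest' : List (Int × Nat))
    (h4 : ∀ r, (q :: w :: rest').getLast? = some r → r.1 = mx) :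
    ∀ r, (if h : w.2 = 1 then rest' else (w.1, w.2 - 1) :: rest').getLast? = some r → r.1 = mx := by
  intro r hr
  by_cases h1 : w.2 = 1
  · rw [dif_pos h1] at hr
    have hne : rest' ≠ [] := by rintro rfl; simp at hr
    obtain ⟨y, t, rfl⟩ := List.exists_cons_of_ne_nil hne
    exact h4 r (by rw [List.getLast?_cons_cons, List.getLast?_cons_cons]; exact hr)
  · rw [dif_neg h1] at hr
    cases rest' with
    | nil =>
      have he : r = (w.1, w.2 - 1) := by simpa using hr.symm
      subst he
      simpa using h4 w (by simp)
    | cons y t =>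
      rw [List.getLast?_cons_cons] at hr
      exact h4 r (by rw [List.getLast?_cons_cons, List.getLast?_cons_cons]; exact hr)

-- ---------- MAIN A: A's loop emits exactly pvGb ----------
theorem pvMainA (mx : Int) :
    ∀ (p : Int × Nat) (runs : List (Int × Nat)),
      ∀ (pre : List Int) (fuel : Nat),
      0 < p.2 → (∀ r ∈ runs, 0 < r.2) →
      List.Pairwise (fun x y : Int × Nat => x.1 < y.1) (p :: runs) →
      (∀ r, runs.getLast? = some r → r.1 = mx) →
      (pre = [] ∨ pre.getLast? ≠ some p.1) →
      (pvExpand runs).length + 1 ≤ fuel →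
      pvLoopA mx fuel (pre ++ List.replicate p.2 p.1) (pvExpand runs).reverse
        = pre ++ pvExpand (pvGb p runs) := by
  intro p runs
  induction p, runs using pvGb.induct with
  | case1 p =>
    intro pre fuel h1 h2 h3 h4 h5 h6
    obtain ⟨f, rfl⟩ : ∃ f, fuel = f + 1 := ⟨fuel - 1, by omega⟩
    rw [show pvExpand [] = [] from rfl]
    simp only [List.reverse_nil]
    rw [pvLoopA_nil, pvGb_nil]
    simp [pvExpand]
  | case2 p q hq =>
    intro pre fuel h1 h2 h3 h4 h5 h6
    have hq2 : 0 < q.2 := h2 q (by simp)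
    obtain ⟨f, rfl⟩ : ∃ f, fuel = f + 1 := ⟨fuel - 1, by omega⟩
    have hlastA : (pre ++ List.replicate p.2 p.1).getLast? = some p.1 := pvBlockLast pre p.1 p.2 h1
    have hgd : PySem.List.pyGetD (pre ++ List.replicate p.2 p.1) (-1) 0 = p.1 := pvBlockGetD pre p.1 p.2 h1
    have hexp : pvExpand [q] = List.replicate q.2 q.1 := by simp [pvExpand]
    have hL : (pvExpand [q]).reverse.getLast? = some q.1 := by
      rw [List.getLast?_reverse]
      exact pvExpandHead q [] hq2
    have hcond : PySem.List.pyGetD (pre ++ List.replicate p.2 p.1) (-1) 0 + 1 = q.1 := by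
      rw [hgd]; omega
    have hmxq : q.1 = mx := h4 q (by simp)
    rw [pvLoopA_mx mx q.1 f _ _ hL hcond hmxq]
    rw [hgd]
    have hAlen : (pre ++ List.replicate p.2 p.1).length = pre.length + p.2 := by simp
    rw [hAlen]
    have htr : pvTrailIdx (pre ++ List.replicate p.2 p.1) p.1 (pre.length + p.2) = (pre.length : Int) - 1 := by
      have := pvTrail p.1 p.2 pre [] h5
      simpa using this
    rw [htr]
    rw [show ((pre.length : Int) - 1 + 1) = ((pre.length : Nat) : Int) from by ring]
    rw [PySem.List.slice_to_natCast, PySem.List.slice_from_natCast]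
    rw [List.take_left, List.drop_left]
    rw [pvGb_single p q hq, hexp, List.reverse_replicate]
    simp [pvExpand, List.append_assoc]
  | case3 p q hq w rest' ih =>
    intro pre fuel h1 h2 h3 h4 h5 h6
    have hq2 : 0 < q.2 := h2 q (by simp)
    have hw2 : 0 < w.2 := h2 w (by simp)
    obtain ⟨f, rfl⟩ : ∃ f, fuel = f + 1 := ⟨fuel - 1, by omega⟩
    obtain ⟨kw, hkw⟩ : ∃ kw, w.2 = kw + 1 := ⟨w.2 - 1, by omega⟩
    have hgd : PySem.List.pyGetD (pre ++ List.replicate p.2 p.1) (-1) 0 = p.1 := pvBlockGetD pre p.1 p.2 h1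
    have hE : pvExpand (q :: w :: rest')
        = List.replicate q.2 q.1 ++ (List.replicate w.2 w.1 ++ pvExpand rest') := by
      rw [pvExpand_cons, pvExpand_cons]
    have hL : (pvExpand (q :: w :: rest')).reverse.getLast? = some q.1 := by
      rw [List.getLast?_reverse]
      exact pvExpandHead q _ hq2
    have hcond : PySem.List.pyGetD (pre ++ List.replicate p.2 p.1) (-1) 0 + 1 = q.1 := by
      rw [hgd]; omega
    have h3' : List.Pairwise (fun x y : Int × Nat => x.1 < y.1) (q :: w :: rest') :=
      (List.pairwise_cons.mp h3).2
    have hqw : q.1 < w.1 := (List.pairwise_cons.mp h3').1 w (by simp)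
    have hrne : (w :: rest') ≠ [] := by simp
    have hqmx : ¬ q.1 = mx := by
      have hmxval : ((w :: rest').getLast hrne).1 = mx := by
        apply h4
        rw [List.getLast?_cons_cons]
        exact List.getLast?_eq_some_getLast hrne
      have hlt : q.1 < ((w :: rest').getLast hrne).1 :=
        (List.pairwise_cons.mp h3').1 _ (List.getLast_mem hrne)
      omega
    have hpw : pvPopWait p.1 [] ((pvExpand (q :: w :: rest')).reverse)
        = (List.replicate q.2 q.1, (List.replicate w.2 w.1 ++ pvExpand rest').reverse) := by
      rw [hE]
      have := pvPopW p.1 q.1 (by omega) q.2 [] (List.replicate w.2 w.1 ++ pvExpand rest')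
        (by
          intro y hy
          have hy' : w.1 = y := by
            rw [hkw, List.replicate_succ, List.cons_append] at hy
            simpa using hy
          omega)
      simpa using this
    have hborrow : (pvPopWait (PySem.List.pyGetD (pre ++ List.replicate p.2 p.1) (-1) 0) []
        ((pvExpand (q :: w :: rest')).reverse)).2.getLast? = some w.1 := by
      rw [hgd, hpw, List.getLast?_reverse, hkw, List.replicate_succ, List.cons_append]
      rfl
    rw [pvLoopA_borrow mx q.1 w.1 f _ _ hL hcond hqmx hborrow]
    rw [hgd, hpw]
    have harr : ((List.replicate w.2 w.1 ++ pvExpand rest').reverse).dropLast ++ List.replicate q.2 q.1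
        = (List.replicate q.2 q.1 ++ (List.replicate kw w.1 ++ pvExpand rest')).reverse := by
      rw [pvRevDropLast, hkw, List.replicate_succ, List.cons_append, List.tail_cons]
      simp [List.reverse_append]
    simp only []
    rw [harr]
    have hlen6 : q.2 + (w.2 + (pvExpand rest').length) ≤ f := by
      rw [pvExpand_len_cons, pvExpand_len_cons] at h6; omega
    rw [pvConsumeRun mx q.1 q.2 f (pre ++ List.replicate p.2 p.1 ++ [w.1]) _ w.1
      List.getLast?_concat (by omega) (by omega)]
    have hT : pvExpand (if h : w.2 = 1 then rest' else (w.1, w.2 - 1) :: rest')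
        = List.replicate kw w.1 ++ pvExpand rest' := by
      rw [pvNewExpand, hkw]; simp
    have hfuel' : (pvExpand (if h : w.2 = 1 then rest' else (w.1, w.2 - 1) :: rest')).length + 1 ≤ f - q.2 := by
      rw [hT]
      simp only [List.length_append, List.length_replicate]
      omega
    have hih := ih (pre ++ List.replicate p.2 p.1 ++ [w.1]) (f - q.2) hq2
      (pvNewCounts q w rest' h2 (by omega))
      (pvNewPairwise q w rest' h3')
      (pvNewLast mx q w rest' (fun r hr => h4 r (by rw [List.getLast?_cons_cons]; exact hr)))
      (Or.inr (by rw [List.getLast?_concat]; simp; omega))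
      hfuel'
    rw [hT] at hih
    rw [hih]
    rw [pvGb_borrow p q w rest' hq]
    rw [pvExpand_cons, pvExpand_cons]
    simp [List.append_assoc]
  | case4 p q rest hq ih =>
    intro pre fuel h1 h2 h3 h4 h5 h6
    have hq2 : 0 < q.2 := h2 q (by simp)
    have hlastA : (pre ++ List.replicate p.2 p.1).getLast? = some p.1 := pvBlockLast pre p.1 p.2 h1
    have hlen6 : q.2 + (pvExpand rest).length + 1 ≤ fuel := by
      rw [pvExpand_len_cons] at h6; omega
    rw [pvExpand_cons]
    rw [pvConsumeRun mx q.1 q.2 fuel _ (pvExpand rest) p.1 hlastA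
      (fun e => hq e.symm) (by omega)]
    have hpq : p.1 < q.1 := (List.pairwise_cons.mp h3).1 q (by simp)
    rw [ih (pre ++ List.replicate p.2 p.1) (fuel - q.2) hq2
      (fun r hr => h2 r (by simp [hr]))
      (List.pairwise_cons.mp h3).2
      (by
        intro r hr
        apply h4
        have hne : rest ≠ [] := by rintro rfl; simp at hr
        obtain ⟨y, t, rfl⟩ := List.exists_cons_of_ne_nil hne
        rw [List.getLast?_cons_cons]; exact hr)
      (Or.inr (by rw [hlastA]; simp; omega))
      (by omega)]
    rw [pvGb_no p q rest hq, pvExpand_cons]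
    simp [List.append_assoc]

-- ---------- pvRuns of a sorted list ----------
theorem pvRunsFstMem : ∀ (l : List Int) (r : Int × Nat), r ∈ pvRuns l → r.1 ∈ l := by
  intro l
  induction l using pvRuns.induct with
  | case1 => intro r hr; rw [pvRuns_nil] at hr; simp at hr
  | case2 x xs ih =>
    intro r hr
    rw [pvRuns_cons] at hr
    rcases List.mem_cons.mp hr with rfl | hr'
    · simp
    · exact List.mem_cons_of_mem x ((List.dropWhile_sublist _).subset (ih r hr'))

theorem pvRunsSpec :
    ∀ s : List Int, List.Pairwise (· ≤ ·) s →
      pvExpand (pvRuns s) = s ∧ (∀ r ∈ pvRuns s, 0 < r.2) ∧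
      List.Pairwise (fun x y : Int × Nat => x.1 < y.1) (pvRuns s) ∧
      (pvRuns s).getLast?.map Prod.fst = s.getLast? := by
  intro s
  induction s using pvRuns.induct with
  | case1 => intro _; refine ⟨?_, ?_, ?_, ?_⟩ <;> simp [pvRuns_nil, pvExpand]
  | case2 x xs ih =>
    intro hp
    obtain ⟨hple, hptail⟩ := List.pairwise_cons.mp hp
    have hpdw : List.Pairwise (· ≤ ·) (xs.dropWhile (· == x)) :=
      List.Pairwise.sublist (List.dropWhile_sublist _) hptail
    obtain ⟨ih1, ih2, ih3, ih4⟩ := ih hpdw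
    have htw : xs.takeWhile (· == x) = List.replicate (xs.takeWhile (· == x)).length x :=
      List.eq_replicate_length.mpr (fun b hb => by simpa using List.mem_takeWhile_imp hb)
    have hxs : List.replicate (xs.takeWhile (· == x)).length x ++ xs.dropWhile (· == x) = xs := by
      rw [← htw, List.takeWhile_append_dropWhile]
    have hgt : ∀ y ∈ xs.dropWhile (· == x), x < y := by
      intro y hy
      cases hdw : xs.dropWhile (· == x) with
      | nil => rw [hdw] at hy; simp at hy
      | cons h0 t0 =>
        have hh0mem : h0 ∈ xs := (List.dropWhile_sublist _).subset (by rw [hdw]; simp)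
        have hh0 : ¬ h0 = x := by
          have := List.head?_dropWhile_not (· == x) xs
          rw [hdw] at this
          simpa using this
        have hxh0 : x < h0 := lt_of_le_of_ne (hple h0 hh0mem) (Ne.symm hh0)
        rw [hdw] at hy
        rcases List.mem_cons.mp hy with rfl | hy'
        · exact hxh0
        · have hp0 : h0 ≤ y := by
            rw [hdw] at hpdw
            exact (List.pairwise_cons.mp hpdw).1 y hy'
          exact lt_of_lt_of_le hxh0 hp0
    refine ⟨?_, ?_, ?_, ?_⟩
    · rw [pvRuns_cons, pvExpand_cons, ih1]
      rw [show (1 + (xs.takeWhile (· == x)).length) = (xs.takeWhile (· == x)).length + 1 from by omega]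
      rw [List.replicate_succ, List.cons_append, hxs]
    · intro r hr
      rw [pvRuns_cons] at hr
      rcases List.mem_cons.mp hr with rfl | hr'
      · simp
      · exact ih2 r hr'
    · rw [pvRuns_cons]
      refine List.pairwise_cons.mpr ⟨?_, ih3⟩
      intro r hr
      exact hgt r.1 (pvRunsFstMem _ r hr)
    · rw [pvRuns_cons]
      cases hdw : xs.dropWhile (· == x) with
      | nil =>
        have hxsr : xs = List.replicate (xs.takeWhile (· == x)).length x := by
          rw [← hxs, hdw]; simp
        have hlast : (x :: xs).getLast? = some x := by
          rw [hxsr, ← List.replicate_succ]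
          simpa using pvBlockLast [] x ((xs.takeWhile (· == x)).length + 1) (by omega)
        rw [hlast]
        simp [pvRuns_nil]
      | cons h0 t0 =>
        have hne : pvRuns (h0 :: t0) ≠ [] := by
          rw [pvRuns_cons]; simp
        have e1 : ((x, 1 + (xs.takeWhile (· == x)).length) :: pvRuns (h0 :: t0)).getLast?
            = (pvRuns (h0 :: t0)).getLast? := by
          rw [show ((x, 1 + (xs.takeWhile (· == x)).length) :: pvRuns (h0 :: t0))
                = [(x, 1 + (xs.takeWhile (· == x)).length)] ++ pvRuns (h0 :: t0) from rfl]
          exact List.getLast?_append_of_ne_nil _ hne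
        rw [e1, ← hdw, ih4]
        rw [show x :: xs = ([x] ++ List.replicate (xs.takeWhile (· == x)).length x) ++ xs.dropWhile (· == x) from by
          rw [List.append_assoc, hxs]; rfl]
        rw [List.getLast?_append_of_ne_nil _ (by rw [hdw]; simp)]

-- ---------- scanRun ----------
theorem pvScan (s : List Int) (v : Int) :
    ∀ (k i : Nat) (rest : List Int),
      s.drop i = List.replicate k v ++ rest →
      (∀ y, rest.head? = some y → y ≠ v) →
      pvScanRun s v i = i + k := by
  intro k
  induction k with
  | zero =>
    intro i rest hd hh
    rw [pvScanRun]
    by_cases hi : i < s.length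
    · rw [dif_pos hi]
      simp only [List.replicate_zero, List.nil_append] at hd
      have hrne : rest ≠ [] := by
        rintro rfl
        rw [List.drop_eq_nil_iff] at hd
        omega
      obtain ⟨y, t, rfl⟩ := List.exists_cons_of_ne_nil hrne
      rw [pvGetHead s i y t hd]
      rw [if_neg (hh y rfl)]
      omega
    · rw [dif_neg hi]; omega
  | succ k ih =>
    intro i rest hd hh
    have hlen : i < s.length := by
      have := congrArg List.length hd
      simp [List.length_drop] at this
      omega
    rw [pvScanRun, dif_pos hlen]
    have hv : PySem.List.pyGetD s (i : Int) 0 = v := by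
      rw [List.replicate_succ, List.cons_append] at hd
      exact pvGetHead s i v _ hd
    rw [if_pos hv]
    have hd' : s.drop (i+1) = List.replicate k v ++ rest := by
      rw [← List.tail_drop, hd, List.replicate_succ, List.cons_append, List.tail_cons]
    rw [ih (i+1) rest hd' hh]
    omega

-- ---------- step lemmas for B's loop ----------
theorem pvLoopB_stop (s : List Int) (fuel i : Nat) (blocks : List (Int × Int)) (prev : Option (Int × Int))
    (h : s.length ≤ i) : pvLoopB s (fuel+1) i blocks prev = (blocks, prev) := by
  simp [pvLoopB, Nat.not_lt.2 h]

theorem pvLoopB_none (s : List Int) (f i : Nat) (blocks : List (Int × Int)) (hi : i < s.length) :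
    pvLoopB s (f+1) i blocks none
      = pvLoopB s f (pvScanRun s (PySem.List.pyGetD s (i : Int) 0) i) blocks
          (some (PySem.List.pyGetD s (i : Int) 0,
                 ((pvScanRun s (PySem.List.pyGetD s (i : Int) 0) i : Int) - (i : Int)))) := by
  simp only [pvLoopB]
  rw [if_pos hi]

theorem pvLoopB_some (s : List Int) (f i : Nat) (blocks : List (Int × Int)) (p : Int × Int)
    (hi : i < s.length) :
    pvLoopB s (f+1) i blocks (some p) =
      (if PySem.List.pyGetD s (i : Int) 0 ≠ p.1 + 1 then
        pvLoopB s f (pvScanRun s (PySem.List.pyGetD s (i : Int) 0) i) (blocks ++ [p])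
          (some (PySem.List.pyGetD s (i : Int) 0,
                 ((pvScanRun s (PySem.List.pyGetD s (i : Int) 0) i : Int) - (i : Int))))
      else if pvScanRun s (PySem.List.pyGetD s (i : Int) 0) i = s.length then
        pvLoopB s f (pvScanRun s (PySem.List.pyGetD s (i : Int) 0) i)
          (blocks ++ [(PySem.List.pyGetD s (i : Int) 0,
                 ((pvScanRun s (PySem.List.pyGetD s (i : Int) 0) i : Int) - (i : Int)))]) (some p)
      else
        pvLoopB s f (pvScanRun s (PySem.List.pyGetD s (i : Int) 0) i + 1)
          (blocks ++ [p, (PySem.List.pyGetD s ((pvScanRun s (PySem.List.pyGetD s (i : Int) 0) i : Int)) 0, 1)])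
          (some (PySem.List.pyGetD s (i : Int) 0,
                 ((pvScanRun s (PySem.List.pyGetD s (i : Int) 0) i : Int) - (i : Int))))) := by
  simp only [pvLoopB]
  rw [if_pos hi]

theorem pvLoopB_new (s : List Int) (f i : Nat) (blocks : List (Int × Int)) (p : Int × Int)
    (hi : i < s.length) (hne : ¬ PySem.List.pyGetD s (i : Int) 0 = p.1 + 1) :
    pvLoopB s (f+1) i blocks (some p)
      = pvLoopB s f (pvScanRun s (PySem.List.pyGetD s (i : Int) 0) i) (blocks ++ [p])
          (some (PySem.List.pyGetD s (i : Int) 0,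
                 ((pvScanRun s (PySem.List.pyGetD s (i : Int) 0) i : Int) - (i : Int)))) := by
  rw [pvLoopB_some s f i blocks p hi, if_pos hne]

theorem pvLoopB_last (s : List Int) (f i : Nat) (blocks : List (Int × Int)) (p : Int × Int)
    (hi : i < s.length) (heq : PySem.List.pyGetD s (i : Int) 0 = p.1 + 1)
    (hj : pvScanRun s (PySem.List.pyGetD s (i : Int) 0) i = s.length) :
    pvLoopB s (f+1) i blocks (some p)
      = pvLoopB s f s.length
          (blocks ++ [(PySem.List.pyGetD s (i : Int) 0, ((s.length : Int) - (i : Int)))]) (some p) := by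
  rw [pvLoopB_some s f i blocks p hi, if_neg (not_not_intro heq), if_pos hj, hj]

theorem pvLoopB_bor (s : List Int) (f i : Nat) (blocks : List (Int × Int)) (p : Int × Int)
    (hi : i < s.length) (heq : PySem.List.pyGetD s (i : Int) 0 = p.1 + 1)
    (hj : ¬ pvScanRun s (PySem.List.pyGetD s (i : Int) 0) i = s.length) :
    pvLoopB s (f+1) i blocks (some p)
      = pvLoopB s f (pvScanRun s (PySem.List.pyGetD s (i : Int) 0) i + 1)
          (blocks ++ [p, (PySem.List.pyGetD s ((pvScanRun s (PySem.List.pyGetD s (i : Int) 0) i : Int)) 0, 1)])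
          (some (PySem.List.pyGetD s (i : Int) 0,
                 ((pvScanRun s (PySem.List.pyGetD s (i : Int) 0) i : Int) - (i : Int)))) := by
  rw [pvLoopB_some s f i blocks p hi, if_neg (not_not_intro heq), if_neg hj]

-- ---------- MAIN B: B's loop emits exactly pvGb ----------
theorem pvMainB (s : List Int) :
    ∀ (p : Int × Nat) (runs : List (Int × Nat)),
      ∀ (i : Nat) (blocks : List (Int × Int)) (fuel : Nat),
      s.drop i = pvExpand runs →
      (∀ r ∈ runs, 0 < r.2) →
      List.Pairwise (fun x y : Int × Nat => x.1 < y.1) (p :: runs) →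
      s.length - i + 1 ≤ fuel →
      (pvLoopB s fuel i blocks (some (p.1, (p.2 : Int)))).1
          ++ (match (pvLoopB s fuel i blocks (some (p.1, (p.2 : Int)))).2 with
              | some q => [q] | none => [])
        = blocks ++ (pvGb p runs).map (fun q => (q.1, (q.2 : Int))) := by
  intro p runs
  induction p, runs using pvGb.induct with
  | case1 p =>
    intro i blocks fuel hd _ _ hf
    obtain ⟨f, rfl⟩ : ∃ f, fuel = f + 1 := ⟨fuel - 1, by omega⟩
    have hi : s.length ≤ i := List.drop_eq_nil_iff.mp (by simpa [pvExpand] using hd)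
    rw [pvLoopB_stop s f i blocks _ hi, pvGb_nil]
    simp
  | case2 p q hq =>
    intro i blocks fuel hd hc hpw hf
    have hq2 : 0 < q.2 := hc q (by simp)
    have hdq : s.drop i = List.replicate q.2 q.1 ++ [] := by simpa [pvExpand] using hd
    have hlen : s.length - i = q.2 := by
      have := congrArg List.length hdq
      simp [List.length_drop] at this
      omega
    have hilen : i + q.2 = s.length := by
      have hile : i < s.length := by omega
      omega
    obtain ⟨f, rfl⟩ : ∃ f, fuel = f + 1 := ⟨fuel - 1, by omega⟩
    have hi : i < s.length := by omega
    have hv : PySem.List.pyGetD s (i : Int) 0 = q.1 := by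
      obtain ⟨k, hk⟩ : ∃ k, q.2 = k + 1 := ⟨q.2 - 1, by omega⟩
      rw [hk, List.replicate_succ, List.cons_append] at hdq
      exact pvGetHead s i q.1 _ hdq
    have hscan : pvScanRun s q.1 i = i + q.2 :=
      pvScan s q.1 q.2 i [] (by simpa using hdq) (by intro y hy; simp at hy)
    rw [pvLoopB_last s f i blocks _ hi (by rw [hv]; omega) (by rw [hv, hscan, hilen])]
    obtain ⟨f', rfl⟩ : ∃ f', f = f' + 1 := ⟨f - 1, by omega⟩
    rw [pvLoopB_stop s f' _ _ _ (by omega)]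
    rw [pvGb_single p q hq]
    have hc2 : ((s.length : Int) - (i : Int)) = ((q.2 : Nat) : Int) := by omega
    rw [hv, hc2]
    simp
  | case3 p q hq w rest' ih =>
    intro i blocks fuel hd hc hpw hf
    have hq2 : 0 < q.2 := hc q (by simp)
    have hw2 : 0 < w.2 := hc w (by simp)
    have h3' : List.Pairwise (fun x y : Int × Nat => x.1 < y.1) (q :: w :: rest') :=
      (List.pairwise_cons.mp hpw).2
    have hqw : q.1 < w.1 := (List.pairwise_cons.mp h3').1 w (by simp)
    have hE : s.drop i = List.replicate q.2 q.1 ++ (List.replicate w.2 w.1 ++ pvExpand rest') := by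
      rw [hd, pvExpand_cons, pvExpand_cons]
    have hlen : s.length - i = q.2 + (w.2 + (pvExpand rest').length) := by
      have := congrArg List.length hE
      simpa [List.length_drop] using this
    have hi : i < s.length := by omega
    have hsl : s.length = i + (q.2 + (w.2 + (pvExpand rest').length)) := by omega
    obtain ⟨f, rfl⟩ : ∃ f, fuel = f + 1 := ⟨fuel - 1, by omega⟩
    have hv : PySem.List.pyGetD s (i : Int) 0 = q.1 := by
      obtain ⟨k, hk⟩ : ∃ k, q.2 = k + 1 := ⟨q.2 - 1, by omega⟩
      have hE' := hE
      rw [hk, List.replicate_succ, List.cons_append] at hE'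
      exact pvGetHead s i q.1 _ hE'
    have hscan : pvScanRun s q.1 i = i + q.2 := by
      apply pvScan s q.1 q.2 i _ hE
      intro y hy
      obtain ⟨kw, hkw⟩ : ∃ kw, w.2 = kw + 1 := ⟨w.2 - 1, by omega⟩
      rw [hkw, List.replicate_succ, List.cons_append] at hy
      have : w.1 = y := by simpa using hy
      omega
    have hdw : s.drop (i + q.2) = List.replicate w.2 w.1 ++ pvExpand rest' := by
      rw [← List.drop_drop, hE]
      simpa using List.drop_left (l₁ := List.replicate q.2 q.1)
    have hsj : PySem.List.pyGetD s ((i + q.2 : Nat) : Int) 0 = w.1 := by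
      obtain ⟨kw, hkw⟩ : ∃ kw, w.2 = kw + 1 := ⟨w.2 - 1, by omega⟩
      have hdw' := hdw
      rw [hkw, List.replicate_succ, List.cons_append] at hdw'
      exact pvGetHead s (i + q.2) w.1 _ hdw'
    rw [pvLoopB_bor s f i blocks _ hi (by rw [hv]; omega)
      (by rw [hv, hscan]; omega)]
    rw [hv, hscan, hsj]
    have hcast : ((i + q.2 : Nat) : Int) - (i : Int) = ((q.2 : Nat) : Int) := by
      push_cast; ring
    rw [hcast]
    have hd' : s.drop (i + q.2 + 1) = pvExpand (if h : w.2 = 1 then rest' else (w.1, w.2 - 1) :: rest') := by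
      rw [← List.tail_drop, hdw, pvNewExpand]
      obtain ⟨kw, hkw⟩ : ∃ kw, w.2 = kw + 1 := ⟨w.2 - 1, by omega⟩
      rw [hkw, List.replicate_succ, List.cons_append, List.tail_cons]
      simp
    rw [ih (i + q.2 + 1) (blocks ++ [(p.1, (p.2 : Int)), (w.1, 1)]) f hd'
      (pvNewCounts q w rest' hc (by omega))
      (pvNewPairwise q w rest' h3')
      (by omega)]
    rw [pvGb_borrow p q w rest' hq]
    simp [List.append_assoc]
  | case4 p q rest hq ih =>
    intro i blocks fuel hd hc hpw hf
    have hq2 : 0 < q.2 := hc q (by simp)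
    have hE : s.drop i = List.replicate q.2 q.1 ++ pvExpand rest := by
      rw [hd, pvExpand_cons]
    have hlen : s.length - i = q.2 + (pvExpand rest).length := by
      have := congrArg List.length hE
      simpa [List.length_drop] using this
    have hi : i < s.length := by omega
    obtain ⟨f, rfl⟩ : ∃ f, fuel = f + 1 := ⟨fuel - 1, by omega⟩
    have hv : PySem.List.pyGetD s (i : Int) 0 = q.1 := by
      obtain ⟨k, hk⟩ : ∃ k, q.2 = k + 1 := ⟨q.2 - 1, by omega⟩
      have hE' := hE
      rw [hk, List.replicate_succ, List.cons_append] at hE'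
      exact pvGetHead s i q.1 _ hE'
    have h3' := (List.pairwise_cons.mp hpw).2
    have hscan : pvScanRun s q.1 i = i + q.2 := by
      apply pvScan s q.1 q.2 i _ hE
      intro y hy
      cases rest with
      | nil => simp [pvExpand] at hy
      | cons r1 t =>
        have hr12 : 0 < r1.2 := hc r1 (by simp)
        rw [pvExpandHead r1 t hr12] at hy
        have hy' : r1.1 = y := by simpa using hy
        have : q.1 < r1.1 := (List.pairwise_cons.mp h3').1 r1 (by simp)
        omega
    rw [pvLoopB_new s f i blocks _ hi (by rw [hv]; intro e; exact hq e)]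
    rw [hv, hscan]
    have hcast : ((i + q.2 : Nat) : Int) - (i : Int) = ((q.2 : Nat) : Int) := by
      push_cast; ring
    rw [hcast]
    have hd' : s.drop (i + q.2) = pvExpand rest := by
      rw [← List.drop_drop, hE]
      simpa using List.drop_left (l₁ := List.replicate q.2 q.1)
    rw [ih (i + q.2) (blocks ++ [(p.1, (p.2 : Int))]) f hd'
      (fun r hr => hc r (by simp [hr])) h3' (by omega)]
    rw [pvGb_no p q rest hq]
    simp [List.append_assoc]

-- ---------- assembling both sides ----------
theorem pvSolutionEval (N : Int) (arr : List Int) (d : List Int) (mx0 x0 : Int) (tl : List Int)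
    (hd : PySem.List.sorted arr (fun x => x) true = d)
    (h0 : PySem.List.pyGet? d 0 = some mx0) (hp : PySem.List.pop? d = some (x0, tl)) :
    solution N arr
      = PySem.Str.join " " ((pvLoopA mx0 (tl.length + 1) [x0] tl).map (fun i => PySem.Int.toStr i)) := by
  show (match PySem.List.pyGet? (PySem.List.sorted arr (fun x => x) true) 0,
              PySem.List.pop? (PySem.List.sorted arr (fun x => x) true) with
        | some mx, some pr =>
            PySem.Str.join " " ((pvLoopA mx (pr.2.length + 1) [pr.1] pr.2).map (fun i => PySem.Int.toStr i))
        | _, _ => "") = _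
  rw [hd, h0, hp]

theorem pvAside (N : Int) (arr : List Int) (h : arr ≠ []) :
    solution N arr = PySem.Str.join " "
      ((pvExpand (pvGo (pvRuns (PySem.List.sorted arr (fun x => x))))).map (fun i => PySem.Int.toStr i)) := by
  have hsne : PySem.List.sorted arr (fun x => x) ≠ [] := by
    rw [Ne, PySem.List.sorted_eq_nil_iff]; exact h
  obtain ⟨hexp, hcounts, hpair, hlastmap⟩ :=
    pvRunsSpec (PySem.List.sorted arr (fun x => x)) (PySem.List.sorted_pairwise arr (fun x => x))
  obtain ⟨x, xs, hsx⟩ := List.exists_cons_of_ne_nil hsne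
  cases hruns : pvRuns (PySem.List.sorted arr (fun x => x)) with
  | nil =>
    exfalso
    rw [hruns] at hexp
    rw [hsx] at hexp
    simp [pvExpand] at hexp
  | cons r0 rs =>
    have hr02 : 0 < r0.2 := hcounts r0 (by rw [hruns]; simp)
    obtain ⟨k, hk⟩ : ∃ k, r0.2 = k + 1 := ⟨r0.2 - 1, by omega⟩
    have hexp' : List.replicate r0.2 r0.1 ++ pvExpand rs = x :: xs := by
      rw [hruns, pvExpand_cons, hsx] at hexp
      exact hexp
    have hexp'' : r0.1 :: (List.replicate k r0.1 ++ pvExpand rs) = x :: xs := by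
      rw [← hexp', hk, List.replicate_succ, List.cons_append]
    have hr01 : r0.1 = x := (List.cons_eq_cons.mp hexp'').1
    have hxs : xs = List.replicate k r0.1 ++ pvExpand rs := (List.cons_eq_cons.mp hexp'').2.symm
    have hd : PySem.List.sorted arr (fun x => x) true = xs.reverse ++ [x] := by
      rw [pvSortRev, hsx]; simp
    obtain ⟨mxv, hmxv⟩ : ∃ m, (x :: xs).getLast? = some m :=
      ⟨(x :: xs).getLast (by simp), List.getLast?_eq_some_getLast (by simp)⟩
    have hget0 : PySem.List.pyGet? (xs.reverse ++ [x]) 0 = some mxv := by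
      rw [show (0 : Int) = ((0 : Nat) : Int) from rfl, PySem.List.pyGet?_natCast]
      rw [show xs.reverse ++ [x] = (x :: xs).reverse from by simp]
      rw [← List.head?_eq_getElem?, List.head?_reverse]
      exact hmxv
    rw [pvSolutionEval N arr (xs.reverse ++ [x]) mxv x xs.reverse hd hget0 (PySem.List.pop?_last _ _)]
    have hxlen : xs.reverse.length = xs.length := by simp
    have hxslen : xs.length = k + (pvExpand rs).length := by
      have := congrArg List.length hxs; simpa using this
    have hstep1 : pvLoopA mxv (xs.reverse.length + 1) [x] xs.reverse
        = pvLoopA mxv (xs.length + 1 - k) ([x] ++ List.replicate k r0.1) (pvExpand rs).reverse := by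
      rw [hxlen, show xs.reverse = (List.replicate k r0.1 ++ pvExpand rs).reverse from by rw [← hxs]]
      exact pvConsumeRun mxv r0.1 k (xs.length + 1) [x] (pvExpand rs) x rfl
        (by rw [hr01]; omega) (by omega)
    have hblk : [x] ++ List.replicate k r0.1 = ([] : List Int) ++ List.replicate r0.2 r0.1 := by
      rw [hk, List.replicate_succ, hr01]
      simp
    have hpair' : List.Pairwise (fun a b : Int × Nat => a.1 < b.1) (r0 :: rs) := by
      rw [hruns] at hpair; exact hpair
    have hmain := pvMainA mxv r0 rs [] (xs.length + 1 - k) hr02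
      (fun r hr => hcounts r (by rw [hruns]; simp [hr]))
      hpair'
      (by
        intro r hr
        have hrs : rs ≠ [] := by rintro rfl; simp at hr
        rw [hruns] at hlastmap
        rw [show ((r0 :: rs).getLast?) = rs.getLast? from by
          obtain ⟨y, t, rfl⟩ := List.exists_cons_of_ne_nil hrs
          exact List.getLast?_cons_cons] at hlastmap
        rw [hr, hsx, hmxv] at hlastmap
        simpa using hlastmap)
      (Or.inl rfl)
      (by omega)
    rw [hstep1, hblk, hmain]
    rw [show pvGo (r0 :: rs) = pvGb r0 rs from rfl]
    simp

theorem pvBside (N : Int) (arr : List Int) (h : arr ≠ []) :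
    solution_alt N arr = PySem.Str.join " "
      ((pvExpand (pvGo (pvRuns (PySem.List.sorted arr (fun x => x))))).map (fun i => PySem.Int.toStr i)) := by
  have hsne : PySem.List.sorted arr (fun x => x) ≠ [] := by
    rw [Ne, PySem.List.sorted_eq_nil_iff]; exact h
  obtain ⟨hexp, hcounts, hpair, _⟩ :=
    pvRunsSpec (PySem.List.sorted arr (fun x => x)) (PySem.List.sorted_pairwise arr (fun x => x))
  cases hruns : pvRuns (PySem.List.sorted arr (fun x => x)) with
  | nil =>
    exfalso
    rw [hruns] at hexp
    have : PySem.List.sorted arr (fun x => x) = [] := by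
      rw [← hexp]; rfl
    exact hsne this
  | cons r0 rs =>
    have hr02 : 0 < r0.2 := hcounts r0 (by rw [hruns]; simp)
    have hexp' : List.replicate r0.2 r0.1 ++ pvExpand rs = PySem.List.sorted arr (fun x => x) := by
      rw [hruns, pvExpand_cons] at hexp
      exact hexp
    have hpair' : List.Pairwise (fun a b : Int × Nat => a.1 < b.1) (r0 :: rs) := by
      rw [hruns] at hpair; exact hpair
    have hslen : (PySem.List.sorted arr (fun x => x)).length = r0.2 + (pvExpand rs).length := by
      have := congrArg List.length hexp'
      simpa using this.symm
    have hi0 : 0 < (PySem.List.sorted arr (fun x => x)).length := by omega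
    have hv0 : PySem.List.pyGetD (PySem.List.sorted arr (fun x => x)) ((0 : Nat) : Int) 0 = r0.1 := by
      obtain ⟨k, hk⟩ : ∃ k, r0.2 = k + 1 := ⟨r0.2 - 1, by omega⟩
      apply pvGetHead _ 0 r0.1 (List.replicate k r0.1 ++ pvExpand rs)
      rw [List.drop_zero, ← hexp', hk, List.replicate_succ, List.cons_append]
    have hscan0 : pvScanRun (PySem.List.sorted arr (fun x => x)) r0.1 0 = 0 + r0.2 := by
      apply pvScan _ r0.1 r0.2 0 (pvExpand rs) (by rw [List.drop_zero, ← hexp'])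
      intro y hy
      cases rs with
      | nil => simp [pvExpand] at hy
      | cons r1 t =>
        have hr12 : 0 < r1.2 := hcounts r1 (by rw [hruns]; simp)
        rw [pvExpandHead r1 t hr12] at hy
        have hy' : r1.1 = y := by simpa using hy
        have : r0.1 < r1.1 := (List.pairwise_cons.mp hpair').1 r1 (by simp)
        omega
    have hfirst : pvLoopB (PySem.List.sorted arr (fun x => x))
        ((PySem.List.sorted arr (fun x => x)).length + 1) 0 [] none
        = pvLoopB (PySem.List.sorted arr (fun x => x))
            ((PySem.List.sorted arr (fun x => x)).length) r0.2 [] (some (r0.1, (r0.2 : Int))) := by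
      rw [pvLoopB_none _ _ 0 [] hi0, hv0, hscan0]
      norm_num
    have hdrop : (PySem.List.sorted arr (fun x => x)).drop r0.2 = pvExpand rs := by
      rw [← hexp']
      simpa using List.drop_left (l₁ := List.replicate r0.2 r0.1)
    have hmainb := pvMainB (PySem.List.sorted arr (fun x => x)) r0 rs r0.2 []
      ((PySem.List.sorted arr (fun x => x)).length) hdrop
      (fun r hr => hcounts r (by rw [hruns]; simp [hr]))
      hpair'
      (by omega)
    simp only [solution_alt]
    rw [hfirst]
    -- combine blocks with the abstract result
    rw [PySem.List.foldl_append_eq_flatMap]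
    rw [hmainb]
    rw [show pvGo (r0 :: rs) = pvGb r0 rs from rfl]
    have hflat : List.flatMap (fun p : Int × Int => PySem.List.pyRepeat [p.1] p.2)
        ((pvGb r0 rs).map (fun q : Int × Nat => (q.1, (q.2 : Int)))) = pvExpand (pvGb r0 rs) := by
      rw [List.flatMap_map]
      simp [pvExpand, PySem.List.pyRepeat_singleton]
    simp only [List.nil_append]
    rw [hflat]

-- ===== VERDICT (by name: the statement is the Claim_ definition above) =====
theorem solution_spec : Claim_equal_solution := by
  intro N arr _ hpre
  unfold Spec_solution
  rw [pvAside N arr hpre, pvBside N arr hpre]
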